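-- pv_equiv track=rewrite | github.com/ShotDownDiane/verl-agent-co | agent_system/environments/env_package/ml4co_kit/projection.py | _normalize_cvrp_routes
-- ===== SOURCE A (Python) =====
-- from typing import List, Tuple, Any
--
-- def _normalize_cvrp_routes(seq: List[int]) -> List[List[int]]:
--     """Split a flat sequence with depot markers (0) into CVRP routes."""
--     if not seq:
--         return []
--     routes: List[List[int]] = []
--     current: List[int] = []
--     for idx in seq:
--         if idx == 0:
--             if current:
--                 current.append(0)
--                 routes.append(current)
--                 current = []
--             current.append(0)
--         else:
--             current.append(idx)
--     if current:
--         if current[-1] != 0: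
--             current.append(0)
--         routes.append(current)
--     return routes
-- ===== SOURCE B (Python) =====
-- from typing import List
--
-- def _normalize_cvrp_routes(seq: List[int]) -> List[List[int]]:
--     """Split a flat sequence with depot markers (0) into CVRP routes
--     by first splitting on zeros into groups, then rendering the routes."""
--     if not seq:
--         return []
--     groups: List[List[int]] = []
--     cur: List[int] = []
--     for x in seq:
--         if x == 0:
--             groups.append(cur)
--             cur = []
--         else:
--             cur.append(x)
--     groups.append(cur)
--     if len(groups) == 1:
--         return [groups[0] + [0]]
--     routes: List[List[int]] = []
--     if groups[0]:
--         routes.append(groups[0] + [0])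
--     for g in groups[1:-1]:
--         routes.append([0] + g + [0])
--     last = groups[-1]
--     routes.append([0] + last + [0] if last else [0])
--     return routes
-- ===== Notes on version B (the rewrite author's own statement) =====
-- stated objective: alternative
-- what changed: B first splits the sequence on zeros into groups, then renders each route from the groups (first route without leading 0, interior routes as [0]+g+[0], final route [0] or [0]+g+[0]), instead of A's single stateful pass that stitches depot markers while scanning.
import Mathlib
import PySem

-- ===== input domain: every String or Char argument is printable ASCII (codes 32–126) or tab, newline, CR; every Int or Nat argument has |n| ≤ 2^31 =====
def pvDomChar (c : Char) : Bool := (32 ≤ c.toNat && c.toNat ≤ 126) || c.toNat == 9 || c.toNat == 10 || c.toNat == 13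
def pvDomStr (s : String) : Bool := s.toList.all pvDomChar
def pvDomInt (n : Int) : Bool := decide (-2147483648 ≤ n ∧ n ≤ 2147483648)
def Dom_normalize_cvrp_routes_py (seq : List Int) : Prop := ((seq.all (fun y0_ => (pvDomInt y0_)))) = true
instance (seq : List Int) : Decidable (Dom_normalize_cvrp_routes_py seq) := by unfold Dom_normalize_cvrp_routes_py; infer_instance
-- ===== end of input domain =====

-- B is an alternative decomposition (split on zeros into groups, then render routes); same return value as A everywhere.

-- ===== PORT A =====
-- one stateful pass: (routes, current); on 0 flush current (with trailing 0) and restart from [0]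
def pvStepA (s : List (List Int) × List Int) (idx : Int) : List (List Int) × List Int :=
  if idx = 0 then
    if s.2 ≠ [] then (s.1 ++ [s.2 ++ [0]], [0]) else (s.1, s.2 ++ [0])
  else (s.1, s.2 ++ [idx])

def normalize_cvrp_routes_py (seq : List Int) : List (List Int) :=
  if seq = [] then []
  else
    let st := seq.foldl pvStepA ([], [])
    if st.2 ≠ [] then
      if st.2.getLast? ≠ some 0 then st.1 ++ [st.2 ++ [0]] else st.1 ++ [st.2]
    else st.1

-- ===== PORT B =====
-- first pass: split on zeros into groups
def pvStepB (s : List (List Int) × List Int) (x : Int) : List (List Int) × List Int :=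
  if x = 0 then (s.1 ++ [s.2], []) else (s.1, s.2 ++ [x])

def normalize_cvrp_routes_py_alt (seq : List Int) : List (List Int) :=
  if seq = [] then []
  else
    let st := seq.foldl pvStepB ([], [])
    let gs := st.1 ++ [st.2]
    if gs.length = 1 then [gs.headI ++ [0]]
    else
      (if gs.headI ≠ [] then [gs.headI ++ [0]] else []) ++
      -- groups[1:-1] (gs.length ≥ 2 here)
      ((gs.drop 1).dropLast.map (fun g => [0] ++ g ++ [0])) ++
      [if gs.getLastD [] ≠ [] then [0] ++ gs.getLastD [] ++ [0] else [0]]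

-- ===== PRECONDITION & SPEC =====
def Spec_normalize_cvrp_routes_py (seq : List Int) (out : List (List Int)) : Prop := out = normalize_cvrp_routes_py_alt seq
instance (seq : List Int) (out : List (List Int)) : Decidable (Spec_normalize_cvrp_routes_py seq out) := by unfold Spec_normalize_cvrp_routes_py; infer_instance

-- ===== CLAIM (what is proved, stated in full; the proofs are below) =====
def Claim_equal_normalize_cvrp_routes_py : Prop := ∀ (seq : List Int), Dom_normalize_cvrp_routes_py seq → Spec_normalize_cvrp_routes_py seq (normalize_cvrp_routes_py seq)

-- ===== LEMMAS AND PROOFS =====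

-- Invariant linking A's fold state (R, c) to B's fold state (G, cur)
def pvRel (a b : List (List Int) × List Int) : Prop :=
  (∀ x ∈ b.2, x ≠ 0) ∧
  ((b.1 = [] ∧ a.1 = [] ∧ a.2 = b.2) ∨
   (∃ G0 rest, b.1 = G0 :: rest ∧
      a.1 = (if G0 ≠ [] then [G0 ++ [0]] else []) ++ rest.map (fun g => [0] ++ g ++ [0]) ∧
      a.2 = 0 :: b.2))

theorem pvRel_fold (seq : List Int) : ∀ (a b : List (List Int) × List Int),
    pvRel a b → pvRel (seq.foldl pvStepA a) (seq.foldl pvStepB b) := by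
  induction seq with
  | nil => intro a b h; simpa using h
  | cons x xs ih =>
    intro a b h
    simp only [List.foldl_cons]
    apply ih
    obtain ⟨hnz, hcase⟩ := h
    by_cases hx : x = 0
    · subst hx
      rcases hcase with ⟨hG, hR, hc⟩ | ⟨G0, rest, hG, hR, hc⟩
      · by_cases hc2 : b.2 = []
        · refine ⟨by simp [pvStepB], Or.inr ⟨[], [], ?_, ?_, ?_⟩⟩ <;>
            simp [pvStepA, pvStepB, hG, hR, hc, hc2]
        · refine ⟨by simp [pvStepB], Or.inr ⟨b.2, [], ?_, ?_, ?_⟩⟩ <;>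
            simp [pvStepA, pvStepB, hG, hR, hc, hc2]
      · have hc2 : a.2 ≠ [] := by simp [hc]
        refine ⟨by simp [pvStepB], Or.inr ⟨G0, rest ++ [b.2], ?_, ?_, ?_⟩⟩ <;>
          simp [pvStepA, pvStepB, hG, hR, hc, hc2]
    · rcases hcase with ⟨hG, hR, hc⟩ | ⟨G0, rest, hG, hR, hc⟩
      · refine ⟨?_, Or.inl ⟨?_, ?_, ?_⟩⟩
        · intro y hy
          simp only [pvStepB, if_neg hx] at hy
          rcases List.mem_append.mp hy with h1 | h1
          · exact hnz y h1
          · simp at h1; simpa [h1] using hx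
        all_goals simp [pvStepA, pvStepB, hx, hG, hR, hc]
      · refine ⟨?_, Or.inr ⟨G0, rest, ?_, ?_, ?_⟩⟩
        · intro y hy
          simp only [pvStepB, if_neg hx] at hy
          rcases List.mem_append.mp hy with h1 | h1
          · exact hnz y h1
          · simp at h1; simpa [h1] using hx
        all_goals simp [pvStepA, pvStepB, hx, hG, hR, hc]

-- if B's fold produced no group, there was no zero: cur = cur0 ++ seq
theorem pvB_no_group (seq : List Int) : ∀ (b : List (List Int) × List Int),
    (seq.foldl pvStepB b).1 = [] → b.1 = [] ∧ (seq.foldl pvStepB b).2 = b.2 ++ seq := by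
  induction seq with
  | nil =>
    intro b h
    simp only [List.foldl_nil] at h
    exact ⟨h, by simp⟩
  | cons x xs ih =>
    intro b h
    simp only [List.foldl_cons] at h ⊢
    by_cases hx : x = 0
    · exfalso
      have := (ih _ h).1
      simp [pvStepB, hx] at this
    · have := ih _ h
      refine ⟨?_, ?_⟩
      · have h1 := this.1; simpa [pvStepB, hx] using h1
      · have h2 := this.2; simpa [pvStepB, hx] using h2

theorem pv_getLast_nonzero (l : List Int) (h : l ≠ []) (hnz : ∀ x ∈ l, x ≠ 0) :
    l.getLast? ≠ some (0 : Int) := by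
  intro hcontra
  have hm : (0 : Int) ∈ l := by
    have he := List.getLast?_eq_some_getLast h
    rw [he] at hcontra
    have h0 : l.getLast h = 0 := by simpa using hcontra
    rw [← h0]; exact List.getLast_mem h
  exact hnz 0 hm rfl

-- ===== VERDICT (by name: the statement is the Claim_ definition above) =====
theorem normalize_cvrp_routes_py_spec : Claim_equal_normalize_cvrp_routes_py := by
  intro seq _
  unfold Spec_normalize_cvrp_routes_py normalize_cvrp_routes_py normalize_cvrp_routes_py_alt
  by_cases hseq : seq = []
  · simp [hseq]
  · simp only [if_neg hseq]
    have hrel := pvRel_fold seq ([], []) ([], []) ⟨by simp, Or.inl ⟨rfl, rfl, rfl⟩⟩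
    set a := seq.foldl pvStepA ([], []) with ha
    set b := seq.foldl pvStepB ([], []) with hb
    obtain ⟨hnz, hcase⟩ := hrel
    rcases hcase with ⟨hG, hR, hc⟩ | ⟨G0, rest, hG, hR, hc⟩
    · -- no zeros in seq: cur = seq ≠ []
      have hcur := pvB_no_group seq ([], []) (by rw [← hb]; exact hG)
      have hcur2 : b.2 = seq := by simpa using hcur.2
      have hb2 : b.2 ≠ [] := by rw [hcur2]; exact hseq
      have hlast := pv_getLast_nonzero b.2 hb2 hnz
      simp [hG, hR, hc, hb2, hlast]
    · -- at least one zero: a.2 = 0 :: cur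
      have ha2 : a.2 ≠ [] := by simp [hc]
      have hg : (G0 :: (rest ++ [b.2])).getLast? = some b.2 := by
        rw [← List.cons_append]; exact List.getLast?_concat
      by_cases hcur : b.2 = []
      · -- current route is just the depot marker
        have hlast : a.2.getLast? = some 0 := by simp [hc, hcur]
        rw [hcur] at hg
        simp [hG, hR, hc, hcur, ha2, hlast, hg, List.dropLast_concat]
      · have hlast : (0 :: b.2).getLast? ≠ some 0 := by
          obtain ⟨y, ys, hx⟩ := List.exists_cons_of_ne_nil hcur
          rw [hx, List.getLast?_cons_cons, ← hx]
          exact pv_getLast_nonzero b.2 hcur hnz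
        simp [hG, hR, hc, hcur, ha2, hlast, hg, List.dropLast_concat]
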